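-- pv_equiv track=rewrite | github.com/negineri/sekai-result-ocr | ocr_result.py | __correct_num
-- ===== SOURCE A (Python) =====
-- def __correct_num(num: str) -> str:
--     res = ""
--     for c in num:
--         if c in ['U', 'O']:
--             res += '0'
--         elif c in ['I', 'l']:
--             res += '1'
--         else:
--             res += c
--     return res
-- ===== SOURCE B (Python) =====
-- def __correct_num(num: str) -> str:
--     for old, new in (('U', '0'), ('O', '0'), ('I', '1'), ('l', '1')):
--         num = num.replace(old, new)
--     return num
-- ===== Notes on version B (the rewrite author's own statement) =====
-- stated objective: alternative
-- what changed: Replaces the single branch-per-character accumulator loop with four staged whole-string substitution passes (chained str.replace), one per OCR confusion pair; correct because no replacement output ('0'/'1') is itself a replaced character.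
import Mathlib
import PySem

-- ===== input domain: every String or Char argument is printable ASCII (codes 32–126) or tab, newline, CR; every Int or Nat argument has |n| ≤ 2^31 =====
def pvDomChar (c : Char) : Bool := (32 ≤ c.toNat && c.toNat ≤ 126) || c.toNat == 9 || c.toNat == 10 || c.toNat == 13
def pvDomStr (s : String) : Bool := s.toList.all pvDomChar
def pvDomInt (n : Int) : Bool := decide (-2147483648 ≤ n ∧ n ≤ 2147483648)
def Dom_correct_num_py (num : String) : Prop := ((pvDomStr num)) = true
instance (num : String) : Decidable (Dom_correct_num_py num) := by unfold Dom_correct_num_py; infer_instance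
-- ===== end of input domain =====

-- B replaces A's single branch-per-character accumulator loop with four staged
-- whole-string substitution passes (chained str.replace), one per OCR confusion pair.

-- ===== PORT A =====
-- A builds res by appending, per character, '0' / '1' / the character itself.
def correct_num_py (num : String) : String :=
  String.ofList (num.toList.foldl
    (fun res c =>
      if c = 'U' ∨ c = 'O' then res ++ ['0']
      else if c = 'I' ∨ c = 'l' then res ++ ['1']
      else res ++ [c]) [])

-- ===== PORT B =====
-- for old, new in (('U','0'),('O','0'),('I','1'),('l','1')): num = num.replace(old, new)
def correct_num_py_alt (num : String) : String :=
  [('U', '0'), ('O', '0'), ('I', '1'), ('l', '1')].foldl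
    (fun s p => PySem.Str.replace s (String.singleton p.1) (String.singleton p.2)) num

-- ===== PRECONDITION & SPEC =====
def Spec_correct_num_py (num : String) (out : String) : Prop := out = correct_num_py_alt num
instance (num : String) (out : String) : Decidable (Spec_correct_num_py num out) := by unfold Spec_correct_num_py; infer_instance

-- ===== CLAIM (what is proved, stated in full; the proofs are below) =====
def Claim_equal_correct_num_py : Prop := ∀ (num : String), Dom_correct_num_py num → Spec_correct_num_py num (correct_num_py num)

-- ===== LEMMAS AND PROOFS =====

-- replace.go with a single-character pattern, enough fuel: maps o ↦ n character-wise.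
theorem pvGo_singleton (o n : Char) (l acc : List Char) (fuel : Nat) (h : l.length ≤ fuel) :
    PySem.Chars.replace.go [o] [n] fuel l acc
      = acc.reverse ++ l.map (fun c => if c = o then n else c) := by
  induction l generalizing fuel acc with
  | nil =>
    cases fuel <;> simp [PySem.Chars.replace.go]
  | cons c t ih =>
    cases fuel with
    | zero => simp at h
    | succ f =>
      simp only [List.length_cons, Nat.succ_le_succ_iff] at h
      by_cases hc : c = o
      · subst hc
        rw [PySem.Chars.replace.go]
        simp [List.isPrefixOf, ih _ _ h]
      · rw [PySem.Chars.replace.go]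
        simp [List.isPrefixOf, hc, ih _ _ h, Ne.symm hc]

-- single-character replace on lists is a map
theorem pvReplace_singleton (o n : Char) (l : List Char) :
    PySem.Chars.replace l [o] [n] = l.map (fun c => if c = o then n else c) := by
  simp [PySem.Chars.replace, pvGo_singleton o n l [] l.length (le_refl _)]

-- A's loop, with the accumulator generalized, is the table-driven map.
theorem pvLoopA_eq_map (l : List Char) (acc : List Char) :
    l.foldl (fun res c =>
      if c = 'U' ∨ c = 'O' then res ++ ['0']
      else if c = 'I' ∨ c = 'l' then res ++ ['1']
      else res ++ [c]) acc
    = acc ++ l.map (fun c =>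
        if c = 'U' ∨ c = 'O' then '0' else if c = 'I' ∨ c = 'l' then '1' else c) := by
  induction l generalizing acc with
  | nil => simp
  | cons c t ih =>
    simp only [List.foldl_cons, List.map_cons, ih]
    split_ifs <;> simp

-- ===== VERDICT (by name: the statement is the Claim_ definition above) =====
theorem correct_num_py_spec : Claim_equal_correct_num_py := by
  intro num _
  unfold Spec_correct_num_py correct_num_py correct_num_py_alt
  apply String.toList_injective
  simp only [List.foldl_cons, List.foldl_nil, PySem.Str.toList_replace, String.toList_singleton,
    String.toList_ofList, pvReplace_singleton, pvLoopA_eq_map, List.nil_append, List.map_map]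
  apply List.map_congr_left
  intro c _
  by_cases hU : c = 'U'
  · subst hU; decide
  by_cases hO : c = 'O'
  · subst hO; decide
  by_cases hI : c = 'I'
  · subst hI; decide
  by_cases hl : c = 'l'
  · subst hl; decide
  simp [hU, hO, hI, hl]
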